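-- pv_equiv track=rewrite | github.com/xhqiao89/OpenGMS_SDK_Python | python3.6/utils.py | IsGUID
-- ===== SOURCE A (Python) =====
-- def IsGUID(statevalue):
--     if isinstance(statevalue, str) :
--         if len(statevalue) == 36:
--             strs = statevalue.split('-')
--             for index, item in enumerate(strs):
--                 if len(item) == 0:
--                     return False
--             return True
--         else :
--             return False
--     else:
--         return False
-- ===== SOURCE B (Python) =====
-- def IsGUID(statevalue):
--     if not isinstance(statevalue, str) or len(statevalue) != 36:
--         return False
--     return not (statevalue.startswith('-') or statevalue.endswith('-') or '--' in statevalue)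
-- ===== Notes on version B (the rewrite author's own statement) =====
-- stated objective: simpler
-- what changed: Instead of building the list of '-'-split fragments and looping over them looking for an empty one, B never splits: an empty fragment exists exactly when the string starts or ends with '-' or contains '--', checked with three substring tests.
import Mathlib
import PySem

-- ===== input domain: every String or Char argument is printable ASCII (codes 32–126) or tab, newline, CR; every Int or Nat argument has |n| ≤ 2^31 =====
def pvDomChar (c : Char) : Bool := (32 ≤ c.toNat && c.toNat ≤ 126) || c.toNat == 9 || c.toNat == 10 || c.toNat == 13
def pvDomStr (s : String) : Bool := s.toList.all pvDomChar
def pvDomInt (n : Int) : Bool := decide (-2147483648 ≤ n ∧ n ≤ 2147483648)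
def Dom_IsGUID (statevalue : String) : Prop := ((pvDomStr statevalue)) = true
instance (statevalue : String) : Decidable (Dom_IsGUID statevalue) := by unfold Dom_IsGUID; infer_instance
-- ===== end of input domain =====

-- B replaces A's split-and-scan-fragments check by three substring tests (simpler, no fragment list).

-- ===== PORT A =====
-- the 'for index, item in enumerate(strs): if len(item) == 0: return False / return True' loop
def isGUIDloopA : List String → Bool
  | [] => true
  | item :: rest => if PySem.Str.len item == 0 then false else isGUIDloopA rest

def IsGUID (statevalue : String) : Bool :=
  if PySem.Str.len statevalue == 36 then
    match PySem.Str.split? statevalue "-" with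
    | some strs => isGUIDloopA strs
    | none => false   -- unreachable: the separator "-" is nonempty
  else false

-- ===== PORT B =====
def IsGUID_alt (statevalue : String) : Bool :=
  if !(PySem.Str.len statevalue == 36) then false
  else !(PySem.Str.startswith statevalue "-" || PySem.Str.endswith statevalue "-"
         || PySem.Str.isIn "--" statevalue)

-- ===== PRECONDITION & SPEC =====
def Spec_IsGUID (statevalue : String) (out : Bool) : Prop := out = IsGUID_alt statevalue
instance (statevalue : String) (out : Bool) : Decidable (Spec_IsGUID statevalue out) := by unfold Spec_IsGUID; infer_instance

-- ===== CLAIM (what is proved, stated in full; the proofs are below) =====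
def Claim_equal_IsGUID : Prop := ∀ (statevalue : String), Dom_IsGUID statevalue → Spec_IsGUID statevalue (IsGUID statevalue)

-- ===== LEMMAS AND PROOFS =====

-- fuel-free restatement of PySem.Chars.splitOn.go for a one-character separator
def splA (d : Char) (cur : List Char) : List Char → List (List Char)
  | [] => [cur.reverse]
  | c :: rest => if c = d then cur.reverse :: splA d [] rest else splA d (c :: cur) rest

-- A's loop, moved to List Char fragments
def loopC : List (List Char) → Bool
  | [] => true
  | item :: rest => if item.length == 0 then false else loopC rest

-- 'no empty fragment from here on', b = 'the current fragment is nonempty'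
def stateB (d : Char) (b : Bool) : List Char → Bool
  | [] => b
  | c :: rest => if c = d then b && stateB d false rest else stateB d true rest

lemma go_eq (d : Char) : ∀ (l : List Char) (fuel : Nat) (cur : List Char) (acc : List (List Char)),
    l.length ≤ fuel →
    PySem.Chars.splitOn.go [d] fuel l cur acc = acc.reverse ++ splA d cur l := by
  intro l
  induction l with
  | nil =>
    intro fuel cur acc _
    rw [PySem.Chars.splitOn.go.eq_def]
    cases fuel <;> simp [splA]
  | cons c rest ih =>
    intro fuel cur acc h
    cases fuel with
    | zero => simp at h
    | succ n =>
      rw [PySem.Chars.splitOn.go.eq_def]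
      simp only [List.isPrefixOf, Bool.and_true]
      by_cases hc : c = d
      · simp [hc, splA, ih n [] (cur.reverse :: acc) (by simpa using h)]
      · have : (d == c) = false := by simp [Ne.symm hc]
        simp [this, hc, splA, ih n (c :: cur) acc (by simpa using h)]

lemma loopA_eq_loopC : ∀ ss : List String, isGUIDloopA ss = loopC (ss.map String.toList) := by
  intro ss
  induction ss with
  | nil => rfl
  | cons s t ih => simp [isGUIDloopA, loopC, ih]

lemma loopC_splA (d : Char) : ∀ (l cur : List Char),
    loopC (splA d cur l) = stateB d (!cur.isEmpty) l := by
  intro l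
  induction l with
  | nil =>
    intro cur
    cases cur <;> simp [splA, loopC, stateB]
  | cons c rest ih =>
    intro cur
    by_cases hc : c = d
    · cases cur <;> simp [splA, loopC, stateB, hc, ih]
    · have := ih (c :: cur)
      simp [splA, stateB, hc] at this ⊢
      simpa using this

lemma stateB_char (d : Char) : ∀ l : List Char,
    (stateB d true l = !(decide ([d] <:+ l) || decide ([d, d] <:+: l))) ∧
    (stateB d false l
      = (decide (l ≠ []) && !decide ([d] <+: l)
          && !(decide ([d] <:+ l) || decide ([d, d] <:+: l)))) := by
  intro l
  induction l with
  | nil => simp [stateB]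
  | cons c rest ih =>
    obtain ⟨ihT, ihF⟩ := ih
    by_cases hc : c = d
    · subst hc
      constructor
      · -- stateB true (c::rest) = stateB false rest
        rw [show stateB c true (c :: rest) = stateB c false rest by simp [stateB], ihF]
        cases rest with
        | nil => simp
        | cons c2 rest2 =>
          have hsuf : ([c] <:+ c :: c2 :: rest2) ↔ ([c] <:+ c2 :: rest2) := by
            rw [List.suffix_cons_iff]; simp
          have hinf : ([c, c] <:+: c :: c2 :: rest2) ↔ ([c] <+: c2 :: rest2) ∨ ([c, c] <:+: c2 :: rest2) := by
            rw [List.infix_cons_iff, List.cons_prefix_cons]; simp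
          clear ihT
          by_cases h1 : [c] <+: c2 :: rest2 <;>
            by_cases h2 : [c] <:+ c2 :: rest2 <;>
              by_cases h3 : [c, c] <:+: c2 :: rest2 <;>
                simp [h1, h2, h3, hsuf, hinf]
      · -- stateB false (c::rest) = false, head is d
        rw [show stateB c false (c :: rest) = (false && stateB c false rest) by simp [stateB]]
        have : ([c] <+: c :: rest) := ⟨rest, rfl⟩
        simp [this]
    · have hpre : ¬ ([d] <+: c :: rest) := by
        intro h; rw [List.cons_prefix_cons] at h; exact hc h.1.symm
      have hsuf : ([d] <:+ c :: rest) ↔ ([d] <:+ rest) := by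
        rw [List.suffix_cons_iff]
        constructor
        · rintro (h | h)
          · cases h; exact absurd rfl hc
          · exact h
        · exact Or.inr
      have hinf : ([d, d] <:+: c :: rest) ↔ ([d, d] <:+: rest) := by
        rw [List.infix_cons_iff]
        constructor
        · rintro (h | h)
          · rw [List.cons_prefix_cons] at h; exact absurd h.1.symm hc
          · exact h
        · exact Or.inr
      constructor
      · rw [show stateB d true (c :: rest) = stateB d true rest by simp [stateB, hc], ihT]
        simp [hsuf, hinf]
      · rw [show stateB d false (c :: rest) = stateB d true rest by simp [stateB, hc], ihT]
        simp [hsuf, hinf, hpre]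

-- A bool equals the decide of its iff-characterisation
lemma bool_eq_decide {b : Bool} {P : Prop} [Decidable P] (h : b = true ↔ P) : b = decide P := by
  by_cases hp : P <;> simp [hp] at h ⊢ <;> simp [h]

-- ===== VERDICT (by name: the statement is the Claim_ definition above) =====
theorem IsGUID_spec : Claim_equal_IsGUID := by
  intro s _
  unfold Spec_IsGUID IsGUID IsGUID_alt
  by_cases hlen : PySem.Str.len s == 36
  · simp only [hlen, if_true, Bool.not_true, Bool.false_eq_true, if_false]
    -- A side: compute the split
    have hsplit : PySem.Str.split? s "-" = some ((PySem.Chars.splitOn s.toList ['-']).map String.ofList) := by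
      have h := PySem.Str.split?_map s "-"
      have h2 : PySem.Chars.split? s.toList "-".toList
          = some (PySem.Chars.splitOn s.toList ['-']) := by
        simp [PySem.Chars.split?]
      rw [h2] at h
      cases hsp : PySem.Str.split? s "-" with
      | none => rw [hsp] at h; simp at h
      | some strs =>
        rw [hsp] at h
        simp only [Option.map_some, Option.some.injEq] at h
        rw [← h]
        simp [Function.comp_def, String.ofList_toList]
    rw [hsplit]
    rw [show (match some ((PySem.Chars.splitOn s.toList ['-']).map String.ofList) with
        | some strs => isGUIDloopA strs
        | none => false)
        = isGUIDloopA ((PySem.Chars.splitOn s.toList ['-']).map String.ofList) from rfl]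
    have hmap : ((PySem.Chars.splitOn s.toList ['-']).map String.ofList).map String.toList
        = PySem.Chars.splitOn s.toList ['-'] := by
      simp [Function.comp_def, String.toList_ofList]
    rw [loopA_eq_loopC, hmap]
    have hgo : PySem.Chars.splitOn s.toList ['-'] = splA '-' [] s.toList := by
      show PySem.Chars.splitOn.go _ _ _ _ _ = _
      rw [go_eq '-' s.toList (s.toList.length + 1) [] [] (by omega)]
      rfl
    rw [hgo, loopC_splA]
    have hne : s.toList ≠ [] := by
      intro h
      have hl := PySem.Str.len_eq s
      rw [h] at hl
      simp at hl
      rw [hl] at hlen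
      exact absurd hlen (by decide)
    have := (stateB_char '-' s.toList).2
    rw [show (!([] : List Char).isEmpty) = false from rfl, this]
    -- B side
    simp only [PySem.Str.startswith_eq, PySem.Str.endswith_eq, PySem.Str.isIn_eq]
    rw [bool_eq_decide (PySem.Chars.startswith_iff s.toList "-".toList),
        bool_eq_decide (PySem.Chars.endswith_iff s.toList "-".toList),
        bool_eq_decide (PySem.Chars.isIn_iff_infix "--".toList s.toList)]
    simp only [hne, ne_eq, not_false_eq_true, decide_true, Bool.true_and]
    show _ = !(decide ((['-'] : List Char) <+: s.toList) || decide ((['-'] : List Char) <:+ s.toList) || decide ((['-', '-'] : List Char) <:+: s.toList))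
    by_cases h1 : (['-'] : List Char) <+: s.toList <;>
      by_cases h2 : (['-'] : List Char) <:+ s.toList <;>
        by_cases h3 : (['-', '-'] : List Char) <:+: s.toList <;>
          simp [h1, h2, h3]
  · simp at hlen
    simp [hlen]
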